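-- pv_equiv track=rewrite | github.com/Isomiddinov25/series.py | series.py | series33
-- ===== SOURCE A (Python) =====
-- def series33(collections):
--     results = []
--     for collection in collections:
--         if 2 in collection:
--             results.append(len(collection) - collection[::-1].index(2))
--         else:
--             results.append(0)
--     return results
-- ===== SOURCE B (Python) =====
-- def _last_pos2(collection):
--     # position after the last occurrence of 2; 0 if absent
--     last = 0
--     for i, x in enumerate(collection):
--         if x == 2:
--             last = i + 1
--     return last
--
-- def series33(collections):
--     return [_last_pos2(c) for c in collections]
-- ===== Notes on version B (the rewrite author's own statement) =====
-- stated objective: simpler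
-- what changed: Replaces the membership test plus reversed-copy .index scan with a single forward pass per list that keeps 'last seen position of 2 plus one' in an accumulator (0 if absent), via a per-list helper and a comprehension.
import Mathlib
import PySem

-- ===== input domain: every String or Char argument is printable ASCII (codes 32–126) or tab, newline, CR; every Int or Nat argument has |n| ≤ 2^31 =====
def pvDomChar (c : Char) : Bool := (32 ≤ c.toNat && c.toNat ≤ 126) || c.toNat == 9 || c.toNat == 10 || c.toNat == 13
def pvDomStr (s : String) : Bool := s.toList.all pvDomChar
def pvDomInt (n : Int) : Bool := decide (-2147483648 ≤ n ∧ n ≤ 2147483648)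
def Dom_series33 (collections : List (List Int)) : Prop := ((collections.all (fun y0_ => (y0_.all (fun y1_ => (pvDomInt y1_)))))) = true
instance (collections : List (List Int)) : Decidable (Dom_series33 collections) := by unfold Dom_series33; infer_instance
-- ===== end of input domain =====

-- B replaces A's membership test + reversed-copy .index scan by one forward pass
-- keeping "last position of 2 plus one" in an accumulator (objective: simpler).

-- ===== PORT A =====
-- collection[::-1] is slice? … (-1); .index(2) raises only when 2 is absent,
-- which the membership guard excludes, so the .getD defaults are unreachable.
def series33 (collections : List (List Int)) : List Int :=
  collections.foldl (fun results collection =>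
    if 2 ∈ collection then
      results ++ [(collection.length : Int) -
        (((PySem.List.index? ((PySem.List.slice? collection none none (-1)).getD []) 2).getD 0 : Nat) : Int)]
    else
      results ++ [0]) []

-- ===== PORT B =====
def lastPos2 (collection : List Int) : Int :=
  (PySem.List.enumerate collection 0).foldl
    (fun last p => if p.2 = 2 then p.1 + 1 else last) 0

def series33_alt (collections : List (List Int)) : List Int :=
  collections.map lastPos2

-- ===== PRECONDITION & SPEC =====
def Spec_series33 (collections : List (List Int)) (out : List Int) : Prop := out = series33_alt collections
instance (collections : List (List Int)) (out : List Int) : Decidable (Spec_series33 collections out) := by unfold Spec_series33; infer_instance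

-- ===== CLAIM (what is proved, stated in full; the proofs are below) =====
def Claim_equal_series33 : Prop := ∀ (collections : List (List Int)), Dom_series33 collections → Spec_series33 collections (series33 collections)

-- ===== LEMMAS AND PROOFS =====

-- A's per-collection value
def fA (c : List Int) : Int :=
  if 2 ∈ c then
    (c.length : Int) -
      (((PySem.List.index? ((PySem.List.slice? c none none (-1)).getD []) 2).getD 0 : Nat) : Int)
  else 0

lemma fA_reverse (c : List Int) :
    fA c = if 2 ∈ c then
        (c.length : Int) - (((PySem.List.index? c.reverse 2).getD 0 : Nat) : Int)
      else 0 := by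
  simp [fA, PySem.List.slice?_none_none_neg_one]

-- B's inner loop with general start index and accumulator
lemma loop_char (c : List Int) : ∀ (s last : Int),
    (PySem.List.enumerate c s).foldl (fun last p => if p.2 = 2 then p.1 + 1 else last) last
      = if 2 ∈ c then
          s + ((c.length : Int) - (((PySem.List.index? c.reverse 2).getD 0 : Nat) : Int))
        else last := by
  induction c using List.reverseRecOn with
  | nil => simp [PySem.List.enumerate]
  | append_singleton xs x ih =>
    intro s last
    rw [PySem.List.enumerate_append, List.foldl_append]
    simp only [PySem.List.enumerate_cons, PySem.List.enumerate_nil, List.foldl_cons,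
      List.foldl_nil, List.reverse_append, List.reverse_cons, List.reverse_nil,
      List.nil_append, List.cons_append, List.mem_append, List.mem_singleton]
    by_cases hx : x = 2
    · subst hx
      rw [PySem.List.index?_cons_self]
      simp
      ring
    · rw [if_neg hx, PySem.List.index?_cons_of_ne xs.reverse hx, ih]
      by_cases hm : 2 ∈ xs
      · have hmem : (2 : Int) ∈ xs.reverse := by simpa using hm
        obtain ⟨k, hk⟩ := Option.isSome_iff_exists.mp
          ((PySem.List.index?_isSome_iff xs.reverse 2).mpr hmem)
        rw [if_pos hm, if_pos (Or.inl hm), hk]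
        simp only [Option.map_some, Option.getD_some, List.length_append,
          List.length_cons, List.length_nil]
        push_cast
        ring
      · have hno : ¬(2 ∈ xs ∨ 2 = x) := by
          rintro (h | h)
          · exact hm h
          · exact hx h.symm
        rw [if_neg hm, if_neg hno]

lemma per_collection (c : List Int) : fA c = lastPos2 c := by
  rw [fA_reverse, lastPos2, loop_char c 0]
  split <;> simp

lemma foldl_acc (cs : List (List Int)) : ∀ acc : List Int,
    cs.foldl (fun results collection =>
      if 2 ∈ collection then
        results ++ [(collection.length : Int) -
          (((PySem.List.index? ((PySem.List.slice? collection none none (-1)).getD []) 2).getD 0 : Nat) : Int)]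
      else results ++ [0]) acc
      = acc ++ cs.map fA := by
  induction cs with
  | nil => intro acc; simp
  | cons c cs ih =>
    intro acc
    simp only [List.foldl_cons, List.map_cons]
    by_cases h : (2 : Int) ∈ c
    · rw [ih]; simp [fA, h]
    · rw [ih]; simp [fA, h]

-- ===== VERDICT (by name: the statement is the Claim_ definition above) =====
theorem series33_spec : Claim_equal_series33 := by
  intro collections _
  unfold Spec_series33 series33 series33_alt
  rw [foldl_acc]
  simp [per_collection]
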